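-- pv_equiv track=rewrite | github.com/crabron/temp | sometestfortwosample.py | fsumalldict
-- ===== SOURCE A (Python) =====
-- from collections import OrderedDict
--
-- def fsumalldict(otu_list,iddict, sumotudict):
--     '''
--     Function create OrderedDict object.
--     key = sample Id
--     value = sum of all otu for this sample
--     '''
--     sumalldict = OrderedDict()
--     leng = len(otu_list)
--     lenglist = range(0, leng)
--     keyids = iddict.keys()
--     zipl = zip(keyids, lenglist)
--     for w in zipl:
--         a = w[1]
--         r = sumotudict.values()
--         y =[t[a] for t in r]
--         sum_y = sum(y)
--         sumalldict.update({w[0]:sum_y})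
--     return sumalldict
-- ===== SOURCE B (Python) =====
-- from collections import OrderedDict
--
-- def fsumalldict(otu_list, iddict, sumotudict):
--     '''Single pass over the rows maintaining a running column-sum vector.'''
--     numcols = min(len(iddict), len(otu_list))
--     keys = list(iddict)[:numcols]
--     sums = [0] * numcols
--     for row in sumotudict.values():
--         sums = [sums[j] + row[j] for j in range(numcols)]
--     return OrderedDict(zip(keys, sums))
-- ===== Notes on version B (the rewrite author's own statement) =====
-- stated objective: simpler
-- what changed: A rescans all matrix rows once per sample column (building a fresh column list and summing it inside the loop); B computes numcols = min(len(iddict), len(otu_list)) once, makes a single pass over the rows maintaining a running column-sum vector, and zips the keys with it.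
import Mathlib
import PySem

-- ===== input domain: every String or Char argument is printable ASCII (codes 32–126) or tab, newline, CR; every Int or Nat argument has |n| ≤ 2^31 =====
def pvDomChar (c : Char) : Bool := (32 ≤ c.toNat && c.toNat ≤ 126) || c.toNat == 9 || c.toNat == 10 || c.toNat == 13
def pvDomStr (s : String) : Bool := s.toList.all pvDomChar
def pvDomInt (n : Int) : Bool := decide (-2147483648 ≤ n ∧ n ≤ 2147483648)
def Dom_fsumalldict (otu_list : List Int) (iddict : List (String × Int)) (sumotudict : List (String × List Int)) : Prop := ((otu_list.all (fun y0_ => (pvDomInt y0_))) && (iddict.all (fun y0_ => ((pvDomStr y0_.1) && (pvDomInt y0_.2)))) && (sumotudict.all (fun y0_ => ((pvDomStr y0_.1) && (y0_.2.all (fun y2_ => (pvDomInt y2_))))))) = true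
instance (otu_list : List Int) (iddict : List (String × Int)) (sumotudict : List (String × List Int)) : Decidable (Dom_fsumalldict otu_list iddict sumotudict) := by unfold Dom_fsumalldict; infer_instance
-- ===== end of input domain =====

-- B replaces A's per-column rescan of all rows by a single pass over the rows that
-- maintains a running column-sum vector (objective: simpler one-pass structure).

-- ===== PORT A =====
def fsumalldict (otu_list : List Int) (iddict : List (String × Int)) (sumotudict : List (String × List Int)) : List (String × Int) :=
  let leng : Int := otu_list.length
  let lenglist := PySem.List.pyRange 0 leng 1
  let keyids := (PySem.Dict.ofList iddict).keys
  let zipl := keyids.zip lenglist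
  (zipl.foldl (fun (sumalldict : PySem.Dict String Int) w =>
      let a := w.2
      let r := (PySem.Dict.ofList sumotudict).values
      -- t[a] is PySem.List.pyGetD t a 0: exact for 0 ≤ a < t.length, i.e. inside Pre_
      let y := r.map (fun t => PySem.List.pyGetD t a 0)
      sumalldict.insert w.1 y.sum)
    PySem.Dict.empty).items

-- ===== PORT B =====
def fsumalldict_alt (otu_list : List Int) (iddict : List (String × Int)) (sumotudict : List (String × List Int)) : List (String × Int) :=
  let numcols : Int := min ((PySem.Dict.ofList iddict).keys.length : Int) (otu_list.length : Int)
  let keys := (PySem.Dict.ofList iddict).keys.take numcols.toNat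
  let sums := (PySem.Dict.ofList sumotudict).values.foldl
      (fun sums row => (PySem.List.pyRange 0 numcols 1).map
          -- row[j] is PySem.List.pyGetD row j 0: exact for j < row.length, i.e. inside Pre_
          (fun j => PySem.List.pyGetD sums j 0 + PySem.List.pyGetD row j 0))
      (List.replicate numcols.toNat 0)
  keys.zip sums

-- ===== PRECONDITION & SPEC =====
-- Pre_ excludes exactly the inputs on which the Python A raises IndexError: some row of the
-- otu matrix shorter than the number of summed columns (B's Python raises there as well).
def Pre_fsumalldict (otu_list : List Int) (iddict : List (String × Int)) (sumotudict : List (String × List Int)) : Prop :=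
  ∀ row ∈ (PySem.Dict.ofList sumotudict).values,
    min (PySem.Dict.ofList iddict).keys.length otu_list.length ≤ row.length
instance (otu_list : List Int) (iddict : List (String × Int)) (sumotudict : List (String × List Int)) : Decidable (Pre_fsumalldict otu_list iddict sumotudict) := by unfold Pre_fsumalldict; infer_instance

def pvWitness_fsumalldict : List Int × (List (String × Int)) × (List (String × List Int)) :=
  ([1, 2], [("a", 1), ("b", 2)], [("s1", [1, 2]), ("s2", [3, 4])])

def Spec_fsumalldict (otu_list : List Int) (iddict : List (String × Int)) (sumotudict : List (String × List Int)) (out : List (String × Int)) : Prop := out = fsumalldict_alt otu_list iddict sumotudict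
instance (otu_list : List Int) (iddict : List (String × Int)) (sumotudict : List (String × List Int)) (out : List (String × Int)) : Decidable (Spec_fsumalldict otu_list iddict sumotudict out) := by unfold Spec_fsumalldict; infer_instance

-- ===== CLAIM (what is proved, stated in full; the proofs are below) =====
def Claim_equal_fsumalldict : Prop := ∀ (otu_list : List Int) (iddict : List (String × Int)) (sumotudict : List (String × List Int)), Dom_fsumalldict otu_list iddict sumotudict → Pre_fsumalldict otu_list iddict sumotudict → Spec_fsumalldict otu_list iddict sumotudict (fsumalldict otu_list iddict sumotudict)

-- ===== LEMMAS AND PROOFS =====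

-- column sum of the matrix `rows` at (Int) index j, with Python's value on in-range indices
def pvColSum (rows : List (List Int)) (j : Int) : Int :=
  (rows.map (fun t => PySem.List.pyGetD t j 0)).sum

theorem pvColSum_cons (r : List Int) (rows : List (List Int)) (j : Int) :
    pvColSum (r :: rows) j = PySem.List.pyGetD r j 0 + pvColSum rows j := by
  simp [pvColSum]

-- B's row loop: folding the per-row update over any rows, starting from (range n).map g
theorem pvFoldRows (n : Nat) (rows : List (List Int)) (g : Nat → Int) :
    rows.foldl
      (fun sums row => (PySem.List.pyRange 0 (n : Int) 1).map
          (fun j => PySem.List.pyGetD sums j 0 + PySem.List.pyGetD row j 0))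
      ((List.range n).map (fun k => g k))
    = (List.range n).map (fun k => g k + pvColSum rows (k : Int)) := by
  induction rows generalizing g with
  | nil => simp [pvColSum]
  | cons r rows ih =>
    simp only [List.foldl_cons]
    have hstep : (PySem.List.pyRange 0 (n : Int) 1).map
        (fun j => PySem.List.pyGetD ((List.range n).map (fun k => g k)) j 0 + PySem.List.pyGetD r j 0)
        = (List.range n).map (fun k => (g k + PySem.List.pyGetD r (k : Int) 0)) := by
      rw [PySem.List.pyRange_zero_nat, List.map_map]
      refine List.map_congr_left ?_
      intro k hk
      simp only [Function.comp, PySem.List.pyGetD_natCast]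
      rw [PySem.List.getD_map_range _ _ _ _ (List.mem_range.mp hk)]
    rw [hstep, ih (fun k => g k + PySem.List.pyGetD r (k : Int) 0)]
    refine List.map_congr_left ?_
    intro k _
    rw [pvColSum_cons]
    ring

theorem pvMapFstZip {α β : Type} (K : List α) (R : List β) :
    ((K.zip R).map Prod.fst) = K.take (min K.length R.length) := by
  induction K generalizing R with
  | nil => simp
  | cons k K ih => cases R with
    | nil => simp
    | cons r R => simp [ih, Nat.succ_min_succ]

-- A's loop: inserting pairwise-fresh keys appends the items in order
theorem pvFoldInsert (zipl : List (String × Int)) (f : String × Int → Int)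
    (d : PySem.Dict String Int)
    (hfresh : ∀ w ∈ zipl, d.contains w.1 = false)
    (hnd : (zipl.map Prod.fst).Nodup) :
    (zipl.foldl (fun d w => d.insert w.1 (f w)) d).items
      = d.items ++ zipl.map (fun w => (w.1, f w)) := by
  induction zipl generalizing d with
  | nil => simp
  | cons w zipl ih =>
    simp only [List.foldl_cons, List.map_cons]
    have hw : d.contains w.1 = false := hfresh w (by simp)
    have hfresh' : ∀ v ∈ zipl, (d.insert w.1 (f w)).contains v.1 = false := by
      intro v hv
      have hne : v.1 ≠ w.1 := by
        have := (List.nodup_cons.mp hnd).1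
        intro h; exact this (h ▸ List.mem_map_of_mem hv)
      rw [PySem.Dict.contains_insert]
      simp [hne, hfresh v (List.mem_cons_of_mem _ hv)]
    rw [ih _ hfresh' (List.nodup_cons.mp hnd).2,
        PySem.Dict.items_insert_of_not_contains d (f w) hw]
    simp

theorem fsumalldict_eq_canonical (otu_list : List Int) (iddict : List (String × Int))
    (sumotudict : List (String × List Int)) :
    fsumalldict otu_list iddict sumotudict
      = ((PySem.Dict.ofList iddict).keys.zip (PySem.List.pyRange 0 (otu_list.length : Int) 1)).map
          (fun w => (w.1, pvColSum (PySem.Dict.ofList sumotudict).values w.2)) := by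
  unfold fsumalldict
  set K := (PySem.Dict.ofList iddict).keys with hK
  set R := PySem.List.pyRange 0 (otu_list.length : Int) 1 with hR
  have hnd : ((K.zip R).map Prod.fst).Nodup := by
    rw [pvMapFstZip]
    exact (PySem.Dict.nodup_keys_ofList iddict).sublist (List.take_sublist _ _)
  have := pvFoldInsert (K.zip R)
      (fun w => pvColSum (PySem.Dict.ofList sumotudict).values w.2) PySem.Dict.empty
      (fun w _ => by simp [PySem.Dict.contains_empty]) hnd
  simpa [pvColSum] using this

theorem fsumalldict_alt_eq_canonical (otu_list : List Int) (iddict : List (String × Int))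
    (sumotudict : List (String × List Int)) :
    fsumalldict_alt otu_list iddict sumotudict
      = ((PySem.Dict.ofList iddict).keys.zip (PySem.List.pyRange 0 (otu_list.length : Int) 1)).map
          (fun w => (w.1, pvColSum (PySem.Dict.ofList sumotudict).values w.2)) := by
  simp only [fsumalldict_alt]
  set K := (PySem.Dict.ofList iddict).keys with hK
  set V := (PySem.Dict.ofList sumotudict).values with hV
  set n : Nat := min K.length otu_list.length with hn
  have hcast : (min (K.length : Int) (otu_list.length : Int)) = (n : Int) := by
    simp [hn]
  have htoNat : (min (K.length : Int) (otu_list.length : Int)).toNat = n := by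
    rw [hcast]; exact Int.toNat_natCast n
  rw [hcast, Int.toNat_natCast]
  have hrepl : (List.replicate n (0 : Int)) = (List.range n).map (fun _ => (0 : Int)) := by
    simp [List.map_const']
  rw [hrepl, pvFoldRows n V (fun _ => 0)]
  -- both sides are length-n lists with i-th entry (K[i], colsum V i)
  apply List.ext_getElem
  · simp [PySem.List.length_pyRange_one, hn]
  · intro i h1 h2
    have h1' : i < n ∧ i < K.length := by simpa using h1
    have hiK : i < K.length := h1'.2
    have hin : i < n := h1'.1
    have hiR : i < (PySem.List.pyRange 0 (otu_list.length : Int) 1).length := by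
      simp [PySem.List.length_pyRange_one]; omega
    simp only [List.getElem_zip, List.getElem_map, List.getElem_take]
    rw [PySem.List.getElem_pyRange_one 0 (otu_list.length : Int) i hiR]
    simp

-- ===== VERDICT (by name: the statement is the Claim_ definition above) =====
theorem fsumalldict_spec : Claim_equal_fsumalldict := by
  intro otu_list iddict sumotudict _ _
  unfold Spec_fsumalldict
  rw [fsumalldict_eq_canonical, fsumalldict_alt_eq_canonical]
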